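-- pv_equiv track=rewrite | github.com/monotype-favorably/ep-videos | src/try_extensions.py | generate_extensions
-- ===== SOURCE A (Python) =====
-- import itertools
-- import string
--
-- def generate_extensions(max_length=3):
--     charset = string.ascii_lowercase + string.digits
--
--     start = False
--     for length in range(3, max_length + 1):
--         for combo in itertools.product(charset, repeat=length):
--             extension = "." + "".join(combo)
--             if start:
--                 yield extension
--             elif extension == ".e1a":
--                 start = True
-- ===== SOURCE B (Python) =====
-- import string
--
--
-- def generate_extensions(max_length=3):
--     charset = string.ascii_lowercase + string.digits
--     n = len(charset)
--
--     def decode(i, length):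
--         # the base-n numeral of i, padded to `length` digits, as charset characters
--         if length == 0:
--             return ""
--         return decode(i // n, length - 1) + charset[i % n]
--
--     rank = 0
--     for ch in "e1a":
--         rank = rank * n + charset.index(ch)
--
--     for length in range(3, max_length + 1):
--         start = rank + 1 if length == 3 else 0
--         for i in range(start, n ** length):
--             yield "." + decode(i, length)
-- ===== Notes on version B (the rewrite author's own statement) =====
-- stated objective: alternative
-- what changed: Replaces A's generate-every-combination-and-scan state machine (itertools.product plus a boolean start flag) by arithmetic unranking: B computes the numeric base-charset rank of the marker once and decodes each index after that rank back into its extension string, so the skipped prefix is never materialised and no per-element flag or marker comparison remains.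
import Mathlib
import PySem

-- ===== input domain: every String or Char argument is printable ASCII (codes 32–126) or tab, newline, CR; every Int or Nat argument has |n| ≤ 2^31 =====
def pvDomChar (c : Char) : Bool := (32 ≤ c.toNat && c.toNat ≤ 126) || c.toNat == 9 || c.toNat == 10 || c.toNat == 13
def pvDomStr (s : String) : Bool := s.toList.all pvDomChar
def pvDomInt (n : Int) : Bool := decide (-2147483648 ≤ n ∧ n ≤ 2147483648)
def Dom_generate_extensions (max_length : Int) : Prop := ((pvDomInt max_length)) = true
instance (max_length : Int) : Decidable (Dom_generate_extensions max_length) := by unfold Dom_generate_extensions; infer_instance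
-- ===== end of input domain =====

-- B replaces A's generate-everything-and-scan-with-a-flag state machine by arithmetic
-- unranking: it computes the base-36 rank of the marker "e1a" once and decodes each index
-- i of range(rank+1, 36**length) back to its string; same output, alternative algorithm.

def pvCharset : List Char := "abcdefghijklmnopqrstuvwxyz0123456789".toList

-- itertools.product(cs, repeat=n) in product order (first component varies slowest); exact
def pvProduct (cs : List Char) : Nat → List (List Char)
  | 0 => [[]]
  | n + 1 => cs.flatMap (fun c => (pvProduct cs n).map (fun t => c :: t))

-- ===== PORT A =====
-- literal port: flag `start`, nested loops over range(3, max_length+1) and the product;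
-- `length.toNat` is exact since every element of the range is ≥ 3.
def generate_extensions (max_length : Int) : List String :=
  (((PySem.List.pyRange 3 (max_length + 1) 1).foldl
      (fun st length =>
        (pvProduct pvCharset length.toNat).foldl
          (fun st combo =>
            let extension := "." ++ String.ofList combo
            if st.2 then (st.1 ++ [extension], st.2)
            else if extension == ".e1a" then (st.1, true)
            else st)
          st)
      (([] : List String), false))).1

-- ===== PORT B =====
-- Source B's decode(i, length): recursion on length; every call has length ≥ 0, so `.toNat`
-- fuel is exact.  charset[i % n] always hits (0 ≤ i % 36 < 36), so `.getD 'a'` is exact.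
def pvDecodeAux (i : Int) : Nat → String
  | 0 => ""
  | l + 1 => pvDecodeAux (PySem.Int.floordiv i 36) l
      ++ String.ofList [(PySem.List.pyGet? pvCharset (PySem.Int.mod i 36)).getD 'a']

def pvDecode (i length : Int) : String := pvDecodeAux i length.toNat

-- Source B's rank loop: for ch in "e1a": rank = rank*n + charset.index(ch)  (n = 36; the
-- index always exists, so `.getD 0` is exact)
def pvRank : Int :=
  ("e1a".toList).foldl (fun r ch => r * 36 + ((PySem.List.index? pvCharset ch).getD 0 : Nat)) 0

-- outer generator of Source B: n ** length ported as 36 ^ length.toNat (length ≥ 3 ≥ 0, exact)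
def generate_extensions_alt (max_length : Int) : List String :=
  (PySem.List.pyRange 3 (max_length + 1) 1).flatMap (fun length =>
    let start : Int := if length == 3 then pvRank + 1 else 0
    (PySem.List.pyRange start ((36 : Int) ^ length.toNat) 1).map
      (fun i => "." ++ pvDecode i length))

-- ===== PRECONDITION & SPEC =====
def Spec_generate_extensions (max_length : Int) (out : List String) : Prop := out = generate_extensions_alt max_length
instance (max_length : Int) (out : List String) : Decidable (Spec_generate_extensions max_length out) := by unfold Spec_generate_extensions; infer_instance

-- ===== CLAIM (what is proved, stated in full; the proofs are below) =====
def Claim_equal_generate_extensions : Prop := ∀ (max_length : Int), Dom_generate_extensions max_length → Spec_generate_extensions max_length (generate_extensions max_length)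

-- ===== LEMMAS AND PROOFS =====

-- A's per-extension step, named for the proofs
def pvStep (st : List String × Bool) (e : String) : List String × Bool :=
  if st.2 then (st.1 ++ [e], st.2)
  else if e == ".e1a" then (st.1, true)
  else st

-- Nat-level version of Source B's decode, for the proofs
def pvDecodeL (i : Nat) : Nat → List Char
  | 0 => []
  | l + 1 => pvDecodeL (i / 36) l ++ [pvCharset.getD (i % 36) 'a']

-- the length-3 extension with index k, for the proofs
def pvExt3 (k : Nat) : String := "." ++ String.ofList (pvDecodeL k 3)

theorem pvStep_true : ∀ (xs : List String) (acc : List String),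
    xs.foldl pvStep (acc, true) = (acc ++ xs, true) := by
  intro xs
  induction xs with
  | nil => intro acc; simp
  | cons x xs ih => intro acc; simp [pvStep, ih]

theorem pvStep_false : ∀ (xs : List String) (acc : List String),
    (xs.foldl pvStep (acc, false)).1 = acc ++ (xs.dropWhile (fun e => e != ".e1a")).drop 1 := by
  intro xs
  induction xs with
  | nil => intro acc; simp
  | cons x xs ih =>
    intro acc
    by_cases h : x = ".e1a"
    · subst h
      simp [pvStep, List.dropWhile, pvStep_true]
    · have hx : (x == ".e1a") = false := by simp [h]
      simp [pvStep, hx, List.dropWhile, bne, ih]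

theorem pvOuter (l : List Int) (st : List String × Bool) :
    l.foldl
      (fun st length =>
        (pvProduct pvCharset length.toNat).foldl
          (fun st combo =>
            let extension := "." ++ String.ofList combo
            if st.2 then (st.1 ++ [extension], st.2)
            else if extension == ".e1a" then (st.1, true)
            else st)
          st)
      st
    = (l.flatMap
        (fun length => (pvProduct pvCharset length.toNat).map (fun combo => "." ++ String.ofList combo))).foldl
        pvStep st := by
  induction l generalizing st with
  | nil => rfl
  | cons a l ih =>
    simp only [List.foldl_cons, List.flatMap_cons, List.foldl_append, ih, List.foldl_map]
    rfl

-- ---- product order = increasing base-36 rank ----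

theorem pvProduct_snoc (cs : List Char) : ∀ l,
    pvProduct cs (l + 1) = (pvProduct cs l).flatMap (fun t => cs.map (fun c => t ++ [c])) := by
  intro l
  induction l with
  | zero =>
    show cs.flatMap (fun c => [[c]]) = _
    induction cs with
    | nil => rfl
    | cons c cs ihc => simpa [pvProduct] using ihc
  | succ l ih =>
    show cs.flatMap (fun c => (pvProduct cs (l+1)).map (fun t => c :: t)) = _
    conv_lhs => rw [ih]
    conv_rhs => rw [show pvProduct cs (l+1) = cs.flatMap (fun c => (pvProduct cs l).map (fun t => c :: t)) from rfl]
    simp only [List.map_flatMap, List.flatMap_map, List.map_map, List.flatMap_assoc,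
      Function.comp_def, List.cons_append]

theorem pvMap_getD_range {α β : Type} (xs : List α) (f : α → β) (d : α) :
    xs.map f = (List.range xs.length).map (fun r => f (xs.getD r d)) := by
  apply List.ext_getElem
  · simp
  · intro n h1 h2
    have hn : n < xs.length := by simpa using h1
    simp [List.getD_eq_getElem?_getD, List.getElem?_eq_getElem hn]

theorem pvRange_mul (m k : Nat) :
    List.range (m * k) = (List.range m).flatMap (fun q => (List.range k).map (fun r => q * k + r)) := by
  induction m with
  | zero => simp
  | succ m ih =>
    have h : (m+1) * k = m * k + k := by ring
    rw [h, List.range_add, ih, List.range_succ]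
    simp [Nat.add_comm, Nat.mul_comm]

theorem pvDecodeL_len (l : Nat) : ∀ i, (pvDecodeL i l).length = l := by
  induction l with
  | zero => intro i; rfl
  | succ l ih => intro i; simp [pvDecodeL, ih]

theorem pvProduct_range : ∀ l,
    pvProduct pvCharset l = (List.range (36 ^ l)).map (fun i => pvDecodeL i l) := by
  intro l
  induction l with
  | zero => simp [pvProduct, pvDecodeL]
  | succ l ih =>
    rw [pvProduct_snoc, ih, pow_succ, pvRange_mul, List.map_flatMap, List.flatMap_map]
    apply List.flatMap_congr
    intro q _
    have hcs : pvCharset.length = 36 := by decide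
    rw [pvMap_getD_range pvCharset _ 'a', hcs, List.map_map]
    apply List.map_congr_left
    intro r hr
    have hr36 : r < 36 := List.mem_range.mp hr
    show pvDecodeL q l ++ [pvCharset.getD r 'a'] = pvDecodeL (q * 36 + r) (l + 1)
    have h1 : (q * 36 + r) / 36 = q := by omega
    have h2 : (q * 36 + r) % 36 = r := by omega
    simp [pvDecodeL, h1, h2]

-- ---- decode facts ----

theorem pvCharset_getD_inj : ∀ r < 36, ∀ s < 36,
    pvCharset.getD r 'a' = pvCharset.getD s 'a' → r = s := by decide

theorem pvDecodeL_inj : ∀ (l i j : Nat), i < 36 ^ l → j < 36 ^ l →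
    pvDecodeL i l = pvDecodeL j l → i = j := by
  intro l
  induction l with
  | zero => intro i j hi hj _; simp [pow_zero] at hi hj; omega
  | succ l ih =>
    intro i j hi hj h
    have h2 : pvDecodeL (i / 36) l = pvDecodeL (j / 36) l ∧
        pvCharset[i % 36]?.getD 'a' = pvCharset[j % 36]?.getD 'a' := by
      have hlen : (pvDecodeL (i / 36) l).length = (pvDecodeL (j / 36) l).length := by
        rw [pvDecodeL_len, pvDecodeL_len]
      have := List.append_inj (by simpa [pvDecodeL] using h : pvDecodeL (i / 36) l ++ [pvCharset.getD (i % 36) 'a'] = pvDecodeL (j / 36) l ++ [pvCharset.getD (j % 36) 'a']) hlen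
      refine ⟨this.1, ?_⟩
      have := this.2
      simpa [List.getD_eq_getElem?_getD] using this
    have hdiv : i / 36 = j / 36 := by
      apply ih
      · exact Nat.div_lt_of_lt_mul (by rw [← pow_succ']; exact hi)
      · exact Nat.div_lt_of_lt_mul (by rw [← pow_succ']; exact hj)
      · exact h2.1
    have hmod : i % 36 = j % 36 := by
      apply pvCharset_getD_inj _ (by omega) _ (by omega)
      simpa [List.getD_eq_getElem?_getD] using h2.2
    omega

theorem pvDecodeAux_natCast : ∀ (l : Nat) (n : Nat),
    pvDecodeAux (n : Int) l = String.ofList (pvDecodeL n l) := by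
  intro l
  induction l with
  | zero => intro n; rfl
  | succ l ih =>
    intro n
    have hdiv : PySem.Int.floordiv (n : Int) 36 = ((n / 36 : Nat) : Int) := by
      exact_mod_cast PySem.Int.floordiv_natCast n 36
    have hmod : PySem.Int.mod (n : Int) 36 = ((n % 36 : Nat) : Int) := by
      exact_mod_cast PySem.Int.mod_natCast n 36
    show pvDecodeAux (PySem.Int.floordiv (n : Int) 36) l
        ++ String.ofList [(PySem.List.pyGet? pvCharset (PySem.Int.mod (n : Int) 36)).getD 'a']
      = String.ofList (pvDecodeL n (l + 1))
    rw [hdiv, hmod, ih, PySem.List.pyGet?_natCast]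
    show _ = String.ofList (pvDecodeL (n / 36) l ++ [pvCharset.getD (n % 36) 'a'])
    rw [← String.ofList_append]
    simp [List.getD_eq_getElem?_getD]

theorem pvRank_eq : pvRank = 6156 := by decide

theorem pvChunk_eq (l : Int) :
    (pvProduct pvCharset l.toNat).map (fun combo => "." ++ String.ofList combo)
    = (PySem.List.pyRange 0 ((36 : Int) ^ l.toNat) 1).map (fun i => "." ++ pvDecode i l) := by
  rw [pvProduct_range, List.map_map, PySem.List.pyRange_one, List.map_map]
  have h1 : (((36 : Int) ^ l.toNat) - 0).toNat = 36 ^ l.toNat := by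
    rw [sub_zero, show ((36 : Int) ^ l.toNat) = ((36 ^ l.toNat : Nat) : Int) by push_cast; ring,
      Int.toNat_natCast]
  rw [h1]
  apply List.map_congr_left
  intro k hk
  show "." ++ String.ofList (pvDecodeL k l.toNat) = "." ++ pvDecode ((0 : Int) + ↑k) l
  rw [pvDecode, zero_add, pvDecodeAux_natCast]

theorem pvExt3_ne (i : Nat) (hi : i < 46656) (hne : i ≠ 6156) : (pvExt3 i == ".e1a") = false := by
  apply beq_eq_false_iff_ne.mpr
  intro h
  apply hne
  have hlist : pvDecodeL i 3 = pvDecodeL 6156 3 := by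
    have h6156 : pvDecodeL 6156 3 = ['e', '1', 'a'] := by decide
    have := congrArg String.toList h
    simp [pvExt3, h6156] at this ⊢
    exact this
  exact pvDecodeL_inj 3 i 6156 (by norm_num; omega) (by norm_num) hlist

theorem pvExt3_marker : pvExt3 6156 = ".e1a" := by decide

set_option maxRecDepth 4000 in
theorem pvMain (m : Int) : generate_extensions m = generate_extensions_alt m := by
  unfold generate_extensions
  rw [pvOuter]
  rw [pvStep_false _ [], List.nil_append]
  by_cases h3 : 3 ≤ m
  case neg =>
    have he : PySem.List.pyRange 3 (m + 1) 1 = [] := PySem.List.pyRange_one_eq_nil (by omega)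
    rw [he]
    unfold generate_extensions_alt
    rw [he]
    simp
  case pos =>
    rw [show PySem.List.pyRange 3 (m + 1) 1 = 3 :: PySem.List.pyRange 4 (m + 1) 1 from
      PySem.List.pyRange_one_cons (by omega)]
    rw [List.flatMap_cons]
    unfold generate_extensions_alt
    rw [show PySem.List.pyRange 3 (m + 1) 1 = 3 :: PySem.List.pyRange 4 (m + 1) 1 from
      PySem.List.pyRange_one_cons (by omega)]
    rw [List.flatMap_cons]
    -- the tails agree: lengths ≥ 4 never see the marker branch or the shifted start
    have hrest : (PySem.List.pyRange 4 (m + 1) 1).flatMap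
          (fun length => (pvProduct pvCharset length.toNat).map (fun combo => "." ++ String.ofList combo))
        = (PySem.List.pyRange 4 (m + 1) 1).flatMap (fun length =>
            let start : Int := if length == 3 then pvRank + 1 else 0
            (PySem.List.pyRange start ((36 : Int) ^ length.toNat) 1).map
              (fun i => "." ++ pvDecode i length)) := by
      apply List.flatMap_congr
      intro l hl
      have h4 : 4 ≤ l := (PySem.List.mem_pyRange_one.mp hl).1
      have : (l == 3) = false := by simp; omega
      simp only [this]
      exact pvChunk_eq l
    -- head chunk: A yields extensions for indices 6157..46655, B ranges over them directly
    have hA3 : (pvProduct pvCharset (3 : Int).toNat).map (fun combo => "." ++ String.ofList combo)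
        = (List.range 46656).map pvExt3 := by
      rw [show (3 : Int).toNat = 3 from rfl, pvProduct_range]
      norm_num [pvExt3]
    rw [hA3, ← hrest]
    -- split range 46656 = (range 6156 ++ [6156]) ++ shifted range 40499
    have hsplit : List.range 46656 = (List.range 6156 ++ [6156]) ++ (List.range 40499).map (fun k => 6157 + k) := by
      rw [show (46656 : Nat) = 6157 + 40499 from by norm_num, List.range_add,
        show (6157 : Nat) = 6156 + 1 from rfl, List.range_succ]
    have hdrop : ((List.range 46656).map pvExt3).dropWhile (fun e => e != ".e1a")
        = pvExt3 6156 :: ((List.range 40499).map (fun k => 6157 + k)).map pvExt3 := by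
      rw [List.dropWhile_map, hsplit, List.append_assoc]
      rw [List.dropWhile_append_of_pos ?hall]
      case hall =>
        intro i hi
        have : i < 6156 := List.mem_range.mp hi
        simp only [Function.comp, bne, pvExt3_ne i (by omega) (by omega), Bool.not_false]
      rw [List.cons_append, List.dropWhile_cons_of_neg (by
        simp only [Function.comp, bne, pvExt3_marker]
        decide)]
      rw [List.map_cons]
      simp
    rw [List.dropWhile_append, hdrop]
    simp only [List.isEmpty_cons, Bool.false_eq_true, if_false, List.cons_append, List.drop_succ_cons,
      List.drop_zero, List.map_map]
    refine congrArg₂ (· ++ ·) ?_ rfl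
    -- B's head chunk at length 3: start = rank + 1 = 6157
    have hb : ((3 : Int) == 3) = true := by decide
    simp only [hb, if_true, pvRank_eq]
    rw [PySem.List.pyRange_one]
    rw [show (((36 : Int) ^ (3 : Int).toNat) - (6156 + 1)).toNat = 40499 from by decide]
    rw [List.map_map]
    apply List.map_congr_left
    intro k _
    show pvExt3 (6157 + k) = "." ++ pvDecode (6156 + 1 + ↑k) 3
    rw [pvDecode, show (3 : Int).toNat = 3 from rfl,
      show (6156 + 1 + (k : Int)) = ((6157 + k : Nat) : Int) from by push_cast; ring,
      pvDecodeAux_natCast]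
    rfl

-- ===== VERDICT (by name: the statement is the Claim_ definition above) =====
theorem generate_extensions_spec : Claim_equal_generate_extensions := by
  intro m _
  show generate_extensions m = generate_extensions_alt m
  exact pvMain m
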